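-- pv_equiv track=rewrite | github.com/chochun/ALS | pathHandler.py | getTermWithoutCons
-- ===== SOURCE A (Python) =====
-- def getPm(paths, lm):
--     pm = []
--     for path in paths:
--         isPm = False
--         for e in path:
--             if e in lm:
--                 isPm = True
--                 break
--         if isPm:
--             pm.append(path)
--     return pm
--
-- def getPn(paths, lm):
--     Pn = []
--     Pm = getPm(paths, lm)
--     for path in paths:
--         if path not in Pm:
--             Pn.append(path)
--     return Pn
--
-- def getWeight(paths):
--     weights={}
--     for path in paths:
--         for e in path:
--             weights[e] = weights.get(e, 0) + 1
--     return weights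
--
-- def isEdgeinPm(edge, Pm):
--     for path in Pm:
--         if edge in path:
--             return True
--     return False
--
-- def isEdgeinPn(edge, Pn):
--     for path in Pn:
--         if edge in path:
--             return True
--     return False
--
-- def getEdgeWithoutConst(edges, lm, Pm, Pn):
--     noConstEdges = []
--     for e in edges:
--         if isEdgeinPm(e, Pm) and (e not in lm) and (not isEdgeinPn(e, Pn)) and (e not in noConstEdges):
--             noConstEdges.append(e)
--     return noConstEdges
--
-- def getTermWithoutCons(edges, lm, paths):
--     Pm = getPm(paths, lm)
--     Pn = getPn(paths, lm)
--     noConstEdges = getEdgeWithoutConst(edges, lm, Pm, Pn)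
--     termsSum = 0
--     traversalofPm = getWeight(Pm)
--     for e in noConstEdges:
--         termsSum += traversalofPm[e]
--     return termsSum
-- ===== SOURCE B (Python) =====
-- def getTermWithoutCons(edges, lm, paths):
--     # One-pass partition of paths; count qualifying edge-occurrences in Pm directly,
--     # which equals summing the per-edge Pm frequencies of the distinct qualifying edges.
--     lmSet = set(lm)
--     pm = []
--     pnEdges = set()
--     for path in paths:
--         if all(e not in lmSet for e in path):
--             pnEdges.update(path)
--         else:
--             pm.append(path)
--     edgesSet = set(edges)
--     termsSum = 0
--     for path in pm:
--         for e in path: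
--             if e in edgesSet and e not in lmSet and e not in pnEdges:
--                 termsSum += 1
--     return termsSum
-- ===== Notes on version B (the rewrite author's own statement) =====
-- stated objective: faster
-- what changed: B partitions paths once into Pm/Pn using a set of lm, builds edge sets, and counts qualifying edge-occurrences while traversing Pm directly, never constructing A's deduplicated noConstEdges list or the getWeight frequency dict and avoiding A's repeated linear scans (list membership, isEdgeinPm/isEdgeinPn per edge).
import Mathlib
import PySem

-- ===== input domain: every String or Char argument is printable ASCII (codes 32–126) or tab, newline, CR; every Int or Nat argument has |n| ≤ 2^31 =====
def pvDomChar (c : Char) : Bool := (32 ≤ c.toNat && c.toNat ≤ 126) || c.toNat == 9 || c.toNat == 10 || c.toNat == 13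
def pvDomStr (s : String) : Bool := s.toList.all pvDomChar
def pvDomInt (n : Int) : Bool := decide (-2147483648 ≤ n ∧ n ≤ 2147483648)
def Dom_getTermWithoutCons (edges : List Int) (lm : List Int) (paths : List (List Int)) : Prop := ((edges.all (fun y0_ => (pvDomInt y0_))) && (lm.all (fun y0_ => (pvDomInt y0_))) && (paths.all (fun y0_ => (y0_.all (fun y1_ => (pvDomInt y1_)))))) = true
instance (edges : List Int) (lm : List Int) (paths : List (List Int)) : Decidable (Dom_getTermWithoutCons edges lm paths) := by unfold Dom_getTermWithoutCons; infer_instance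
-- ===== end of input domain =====

-- B replaces A's quadratic scans (list membership, per-edge isEdgeinPm/isEdgeinPn, the
-- getWeight dict) by a one-pass partition plus sets and counts qualifying occurrences in Pm.

-- ===== PORT A =====

-- inner 'for e in path: if e in lm: isPm = True; break' of getPm
def pvIsPmLoop (lm : List Int) (path : List Int) : Bool :=
  match path with
  | [] => false
  | e :: rest => if lm.contains e then true else pvIsPmLoop lm rest

def pvGetPm (paths : List (List Int)) (lm : List Int) : List (List Int) :=
  paths.foldl (fun pm path => if pvIsPmLoop lm path then pm ++ [path] else pm) []

def pvGetPn (paths : List (List Int)) (lm : List Int) : List (List Int) :=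
  let Pm := pvGetPm paths lm
  paths.foldl (fun pn path => if !(Pm.contains path) then pn ++ [path] else pn) []

-- weights[e] = weights.get(e, 0) + 1  is  Dict.modify e 0 (· + 1)
def pvGetWeight (paths : List (List Int)) : PySem.Dict Int Int :=
  paths.foldl (fun w path => path.foldl (fun w e => w.modify e 0 (fun x => x + 1)) w) PySem.Dict.empty

def pvIsEdgeinPm (edge : Int) (Pm : List (List Int)) : Bool :=
  match Pm with
  | [] => false
  | path :: rest => if path.contains edge then true else pvIsEdgeinPm edge rest

def pvIsEdgeinPn (edge : Int) (Pn : List (List Int)) : Bool :=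
  match Pn with
  | [] => false
  | path :: rest => if path.contains edge then true else pvIsEdgeinPn edge rest

def pvGetEdgeWithoutConst (edges : List Int) (lm : List Int) (Pm Pn : List (List Int)) : List Int :=
  edges.foldl (fun acc e =>
    if pvIsEdgeinPm e Pm && !(lm.contains e) && !(pvIsEdgeinPn e Pn) && !(acc.contains e)
    then acc ++ [e] else acc) []

-- Python's traversalofPm[e] would raise KeyError only for a key not in the dict; every e in
-- noConstEdges occurs in Pm (first conjunct of getEdgeWithoutConst), so the key is always
-- present and getD e 0 is exact; A is total.
def getTermWithoutCons (edges : List Int) (lm : List Int) (paths : List (List Int)) : Int :=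
  let Pm := pvGetPm paths lm
  let Pn := pvGetPn paths lm
  let noConstEdges := pvGetEdgeWithoutConst edges lm Pm Pn
  let traversalofPm := pvGetWeight Pm
  noConstEdges.foldl (fun termsSum e => termsSum + traversalofPm.getD e 0) 0

-- ===== PORT B =====
def getTermWithoutCons_alt (edges : List Int) (lm : List Int) (paths : List (List Int)) : Int :=
  let lmSet : PySem.Set Int := PySem.Set.ofList lm
  let st : List (List Int) × PySem.Set Int :=
    paths.foldl (fun st path =>
      if path.all (fun e => !(lmSet.contains e))
      then (st.1, path.foldl (fun s e => s.add e) st.2)   -- pnEdges.update(path)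
      else (st.1 ++ [path], st.2))                        -- pm.append(path)
      ([], PySem.Set.ofList [])
  let edgesSet : PySem.Set Int := PySem.Set.ofList edges
  st.1.foldl (fun termsSum path =>
    path.foldl (fun termsSum e =>
      if edgesSet.contains e && !(lmSet.contains e) && !(st.2.contains e)
      then termsSum + 1 else termsSum) termsSum) 0

-- ===== PRECONDITION & SPEC =====
def Spec_getTermWithoutCons (edges : List Int) (lm : List Int) (paths : List (List Int)) (out : Int) : Prop := out = getTermWithoutCons_alt edges lm paths
instance (edges : List Int) (lm : List Int) (paths : List (List Int)) (out : Int) : Decidable (Spec_getTermWithoutCons edges lm paths out) := by unfold Spec_getTermWithoutCons; infer_instance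

-- ===== CLAIM (what is proved, stated in full; the proofs are below) =====
def Claim_equal_getTermWithoutCons : Prop := ∀ (edges : List Int) (lm : List Int) (paths : List (List Int)), Dom_getTermWithoutCons edges lm paths → Spec_getTermWithoutCons edges lm paths (getTermWithoutCons edges lm paths)

-- ===== LEMMAS AND PROOFS =====

theorem pvIsPmLoop_eq_any (lm path : List Int) : pvIsPmLoop lm path = path.any (fun e => lm.contains e) := by
  induction path with
  | nil => rfl
  | cons e rest ih => by_cases h : lm.contains e <;> simp [pvIsPmLoop, List.any_cons, ih]

theorem pvGetPm_eq (paths : List (List Int)) (lm : List Int) :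
    pvGetPm paths lm = paths.filter (fun p => pvIsPmLoop lm p) := by
  have := PySem.List.foldl_append_if (fun p => pvIsPmLoop lm p) (id : List Int → List Int) paths []
  simpa [pvGetPm] using this

theorem mem_pvGetPm (paths : List (List Int)) (lm : List Int) (x : List Int) :
    x ∈ pvGetPm paths lm ↔ x ∈ paths ∧ pvIsPmLoop lm x = true := by
  simp [pvGetPm_eq, List.mem_filter]

theorem pvGetPn_eq (paths : List (List Int)) (lm : List Int) :
    pvGetPn paths lm = paths.filter (fun p => !(pvIsPmLoop lm p)) := by
  unfold pvGetPn
  have h := PySem.List.foldl_append_if (fun p => !((pvGetPm paths lm).contains p)) (id : List Int → List Int) paths []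
  simp only [id] at h
  simp only [h, List.map_id, List.nil_append]
  apply List.filter_congr
  intro p hp
  by_cases hm : pvIsPmLoop lm p = true
  · have : p ∈ pvGetPm paths lm := (mem_pvGetPm _ _ _).2 ⟨hp, hm⟩
    simp [this, hm]
  · have : p ∉ pvGetPm paths lm := fun hc => hm ((mem_pvGetPm _ _ _).1 hc).2
    simp [this]
    simpa using hm

theorem pvIsEdgeinPm_iff (e : Int) (L : List (List Int)) :
    pvIsEdgeinPm e L = true ↔ e ∈ L.flatten := by
  induction L with
  | nil => simp [pvIsEdgeinPm]
  | cons p rest ih =>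
    by_cases h : e ∈ p <;> simp [pvIsEdgeinPm, h, ih]

theorem pvIsEdgeinPn_eq (e : Int) (L : List (List Int)) : pvIsEdgeinPn e L = pvIsEdgeinPm e L := by
  induction L with
  | nil => rfl
  | cons p rest ih => simp [pvIsEdgeinPn, pvIsEdgeinPm, ih]

theorem pvGetWeight_getD (L : List (List Int)) (e : Int) :
    (pvGetWeight L).getD e 0 = (L.flatten.count e : Int) := by
  unfold pvGetWeight
  rw [← List.foldl_flatten]
  rw [PySem.Dict.getD_foldl_modify_add_one]
  simp [PySem.Dict.getD_empty]

theorem pv_countP_or_disjoint {α : Type} (p q : α → Bool) (l : List α)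
    (h : ∀ x ∈ l, ¬(p x = true ∧ q x = true)) :
    l.countP (fun x => p x || q x) = l.countP p + l.countP q := by
  induction l with
  | nil => simp
  | cons a l ih =>
    have ha := h a (by simp)
    have hl : ∀ x ∈ l, ¬(p x = true ∧ q x = true) := fun x hx => h x (by simp [hx])
    by_cases hp : p a = true
    · have hq : ¬ q a = true := fun hq => ha ⟨hp, hq⟩
      simp [hp, hq, ih hl]; omega
    · by_cases hq : q a = true <;> simp [hp, hq, ih hl] <;> omega


theorem pv_sum_counts (d l : List Int) (hd : d.Nodup) :
    ((d.map (fun e => (l.count e : Int))).sum) = (l.countP (fun x => d.contains x) : Int) := by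
  induction d with
  | nil => simp [List.countP_eq_zero.mpr]
  | cons e d ih =>
    have hnd : d.Nodup := hd.of_cons
    have hne : e ∉ d := by simp [List.nodup_cons] at hd; exact hd.1
    have hsplit : l.countP (fun x => (e :: d).contains x)
        = l.countP (fun x => x == e) + l.countP (fun x => d.contains x) := by
      have := pv_countP_or_disjoint (fun x => x == e) (fun x => d.contains x) l
        (by intro x hx ⟨h1, h2⟩
            simp at h1
            subst h1
            exact hne (by simpa using h2))
      simpa [List.contains_cons] using this
    rw [List.map_cons, List.sum_cons, ih hnd, hsplit, List.count_eq_countP]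
    push_cast
    ring

theorem pv_dedup_filter_spec (P : Int → Bool) :
    ∀ (l acc : List Int), acc.Nodup →
      (l.foldl (fun acc e => if P e && !(acc.contains e) then acc ++ [e] else acc) acc).Nodup ∧
      (∀ x, x ∈ l.foldl (fun acc e => if P e && !(acc.contains e) then acc ++ [e] else acc) acc
            ↔ x ∈ acc ∨ (x ∈ l ∧ P x = true)) := by
  intro l
  induction l with
  | nil => intro acc h; simpa using h
  | cons e rest ih =>
    intro acc hacc
    rw [List.foldl_cons]
    by_cases hc : (P e && !(acc.contains e)) = true
    · rw [if_pos hc]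
      have he : e ∉ acc := by
        simp at hc
        exact hc.2
      have hPe : P e = true := by
        simp at hc
        exact hc.1
      have hacc' : (acc ++ [e]).Nodup := by
        simp [List.nodup_append, hacc]
        intro a ha hae
        exact he (hae ▸ ha)
      obtain ⟨hn, hm⟩ := ih (acc ++ [e]) hacc'
      refine ⟨hn, ?_⟩
      intro x
      rw [hm x]
      simp only [List.mem_append, List.mem_cons, List.not_mem_nil, or_false]
      constructor
      · rintro ((h | rfl) | ⟨h1, h2⟩)
        · exact Or.inl h
        · exact Or.inr ⟨Or.inl rfl, hPe⟩
        · exact Or.inr ⟨Or.inr h1, h2⟩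
      · rintro (h | ⟨(rfl | h1), h2⟩)
        · exact Or.inl (Or.inl h)
        · exact Or.inl (Or.inr rfl)
        · exact Or.inr ⟨h1, h2⟩
    · rw [if_neg hc]
      obtain ⟨hn, hm⟩ := ih acc hacc
      refine ⟨hn, ?_⟩
      intro x
      rw [hm x]
      simp only [List.mem_cons]
      constructor
      · rintro (h | ⟨h1, h2⟩)
        · exact Or.inl h
        · exact Or.inr ⟨Or.inr h1, h2⟩
      · rintro (h | ⟨(rfl | h1), h2⟩)
        · exact Or.inl h
        · simp only [Bool.and_eq_true, Bool.not_eq_true'] at hc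
          rcases Decidable.not_and_iff_not_or_not.mp hc with h | h
          · exact absurd h2 h
          · have hx : x ∈ acc := by
              have hb : acc.contains x = true := by
                cases hcb : acc.contains x
                · exact absurd hcb h
                · rfl
              simpa [List.contains_iff_mem] using hb
            exact Or.inl hx
        · exact Or.inr ⟨h1, h2⟩

theorem pv_ofList_contains (xs : List Int) (e : Int) :
    (PySem.Set.ofList xs).contains e = xs.contains e := by
  by_cases h : e ∈ xs <;>
    simp [PySem.Set.contains, PySem.Set.mem_ofList, h]

theorem pv_all_not_eq_not_any (p : Int → Bool) (l : List Int) :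
    (l.all fun e => !(p e)) = !(l.any p) := by
  induction l with
  | nil => rfl
  | cons a l ih => by_cases h : p a <;> simp [h, ih]

theorem pv_setfold_mem (path : List Int) :
    ∀ (s : PySem.Set Int) (x : Int),
      x ∈ path.foldl (fun s e => s.add e) s ↔ x ∈ s ∨ x ∈ path := by
  induction path with
  | nil => simp
  | cons e rest ih =>
    intro s x
    rw [List.foldl_cons, ih]
    rw [PySem.Set.mem_add]
    simp only [List.mem_cons]
    tauto

theorem pv_partition_fst (cond : List Int → Bool) :
    ∀ (paths : List (List Int)) (acc : List (List Int) × PySem.Set Int),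
      (paths.foldl (fun st path =>
          if cond path then (st.1, path.foldl (fun s e => s.add e) st.2)
          else (st.1 ++ [path], st.2)) acc).1
        = acc.1 ++ paths.filter (fun p => !(cond p)) := by
  intro paths
  induction paths with
  | nil => simp
  | cons p rest ih =>
    intro acc
    rw [List.foldl_cons]
    by_cases h : cond p <;> simp [h, ih]

theorem pv_partition_snd_mem (cond : List Int → Bool) :
    ∀ (paths : List (List Int)) (acc : List (List Int) × PySem.Set Int) (x : Int),
      x ∈ (paths.foldl (fun st path =>
              if cond path then (st.1, path.foldl (fun s e => s.add e) st.2)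
              else (st.1 ++ [path], st.2)) acc).2
        ↔ x ∈ acc.2 ∨ x ∈ (paths.filter cond).flatten := by
  intro paths
  induction paths with
  | nil => simp
  | cons p rest ih =>
    intro acc x
    rw [List.foldl_cons]
    by_cases h : cond p
    · rw [if_pos h]
      rw [ih]
      simp only [pv_setfold_mem, List.filter_cons_of_pos h, List.flatten_cons, List.mem_append]
      tauto
    · rw [if_neg h]
      rw [ih]
      simp [h]

theorem pv_main (edges lm : List Int) (paths : List (List Int)) :
    getTermWithoutCons edges lm paths = getTermWithoutCons_alt edges lm paths := by
  set Pm := pvGetPm paths lm with hPm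
  set Pn := pvGetPn paths lm with hPn
  set P : Int → Bool := fun e => pvIsEdgeinPm e Pm && !(lm.contains e) && !(pvIsEdgeinPn e Pn) with hP
  set noConst := pvGetEdgeWithoutConst edges lm Pm Pn with hNC
  have hNCeq : noConst =
      edges.foldl (fun acc e => if P e && !(acc.contains e) then acc ++ [e] else acc) [] := rfl
  obtain ⟨hnd, hmem⟩ := pv_dedup_filter_spec P edges []  (by simp)
  rw [← hNCeq] at hnd hmem
  -- A's value
  have hA : getTermWithoutCons edges lm paths
      = (noConst.map (fun e => ((Pm.flatten).count e : Int))).sum := by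
    show noConst.foldl (fun s e => s + (pvGetWeight Pm).getD e 0) 0 = _
    rw [PySem.List.foldl_add]
    simp [pvGetWeight_getD]
  have hA2 : (noConst.map (fun e => ((Pm.flatten).count e : Int))).sum
      = ((Pm.flatten).countP (fun x => noConst.contains x) : Int) :=
    pv_sum_counts noConst Pm.flatten hnd
  -- B's value
  set lmSet := PySem.Set.ofList lm with hlmSet
  set cond : List Int → Bool := fun p => p.all (fun e => !(lmSet.contains e)) with hcondDef
  set st := paths.foldl (fun st path =>
      if cond path then (st.1, path.foldl (fun s e => s.add e) st.2)
      else (st.1 ++ [path], st.2)) (([], PySem.Set.ofList []) : List (List Int) × PySem.Set Int)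
    with hst
  have hcond : ∀ p, cond p = !(pvIsPmLoop lm p) := by
    intro p
    rw [hcondDef, pvIsPmLoop_eq_any]
    simp only [hlmSet, pv_ofList_contains]
    exact pv_all_not_eq_not_any (fun e => lm.contains e) p
  have hfiltercond : paths.filter cond = Pn := by
    rw [hPn, pvGetPn_eq]
    exact List.filter_congr (fun p _ => hcond p)
  have hst1 : st.1 = Pm := by
    rw [hst, pv_partition_fst]
    rw [hPm, pvGetPm_eq]
    simp only [List.nil_append]
    refine List.filter_congr (fun p _ => ?_)
    rw [hcond p, Bool.not_not]
  have hst2 : ∀ x, x ∈ st.2 ↔ x ∈ Pn.flatten := by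
    intro x
    rw [hst, pv_partition_snd_mem]
    rw [hfiltercond]
    simp
  set Q : Int → Bool := fun e =>
      (PySem.Set.ofList edges).contains e && !(lmSet.contains e) && !(st.2.contains e) with hQ
  have hB : getTermWithoutCons_alt edges lm paths
      = ((Pm.flatten).countP Q : Int) := by
    have hBdef : getTermWithoutCons_alt edges lm paths
        = st.1.foldl (fun t path => path.foldl
            (fun t e => if Q e then t + 1 else t) t) 0 := rfl
    rw [hBdef, hst1, ← List.foldl_flatten, PySem.List.foldl_count_if]
    simp
  -- the two counts agree
  have hcount : (Pm.flatten).countP Q = (Pm.flatten).countP (fun x => noConst.contains x) := by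
    apply List.countP_congr
    intro x hx
    have hinPm : pvIsEdgeinPm x Pm = true := (pvIsEdgeinPm_iff x Pm).2 hx
    have hst2x : st.2.contains x = true ↔ x ∈ Pn.flatten := by
      rw [PySem.Set.contains, List.contains_iff_mem]
      exact hst2 x
    constructor
    · intro h
      rw [hQ] at h
      simp only [Bool.and_eq_true, Bool.not_eq_true'] at h
      obtain ⟨⟨h1, h2⟩, h3⟩ := h
      rw [List.contains_iff_mem]
      rw [hmem x]
      refine Or.inr ⟨?_, ?_⟩
      · rw [pv_ofList_contains, List.contains_iff_mem] at h1
        exact h1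
      · rw [hP]
        simp only [Bool.and_eq_true, Bool.not_eq_true']
        refine ⟨⟨hinPm, ?_⟩, ?_⟩
        · rw [hlmSet, pv_ofList_contains] at h2
          exact h2
        · rw [pvIsEdgeinPn_eq]
          cases hb : pvIsEdgeinPm x Pn
          · rfl
          · exfalso
            have : x ∈ Pn.flatten := (pvIsEdgeinPm_iff x Pn).1 hb
            rw [← hst2x] at this
            rw [this] at h3
            exact absurd h3 (by simp)
    · intro h
      rw [List.contains_iff_mem, hmem x] at h
      rcases h with h | ⟨h1, h2⟩
      · simp at h
      · rw [hP] at h2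
        simp only [Bool.and_eq_true, Bool.not_eq_true'] at h2
        obtain ⟨⟨_, h2b⟩, h2c⟩ := h2
        rw [hQ]
        simp only [Bool.and_eq_true, Bool.not_eq_true']
        refine ⟨⟨?_, ?_⟩, ?_⟩
        · rw [pv_ofList_contains, List.contains_iff_mem]
          exact h1
        · rw [hlmSet, pv_ofList_contains]
          exact h2b
        · cases hb : st.2.contains x
          · rfl
          · exfalso
            have : x ∈ Pn.flatten := hst2x.1 hb
            have := (pvIsEdgeinPm_iff x Pn).2 this
            rw [pvIsEdgeinPn_eq, this] at h2c
            exact absurd h2c (by simp)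
  rw [hA, hA2, hB, hcount]

-- ===== VERDICT (by name: the statement is the Claim_ definition above) =====
theorem getTermWithoutCons_spec : Claim_equal_getTermWithoutCons := by
  intro edges lm paths _
  unfold Spec_getTermWithoutCons
  exact pv_main edges lm paths
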